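-- pv_equiv track=rewrite | github.com/ChristofferGreen/PrimeStruct | scripts/semantic_memory_benchmark.py | benchmark_row_fact_families_mode
-- ===== SOURCE A (Python) =====
-- SEMANTIC_COLLECTOR_FAMILIES = (
--     "definitions",
--     "executions",
--     "direct_call_targets",
--     "method_call_targets",
--     "bridge_path_choices",
--     "callable_summaries",
--     "type_metadata",
--     "struct_field_metadata",
--     "binding_facts",
--     "return_facts",
--     "local_auto_facts",
--     "query_facts",
--     "try_facts",
--     "on_error_facts",
-- )
--
-- def benchmark_row_fact_families_mode(row: dict) -> str:
--     value = row.get("fact_families", "auto")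
--     if value is None:
--         return "auto"
--     normalized = str(value).strip().lower()
--     if normalized in ("", "all", "auto", "null"):
--         return "auto"
--     if normalized == "none":
--         return "none"
--     families = [token.strip() for token in normalized.split(",") if token.strip()]
--     if not families:
--         return "auto"
--     seen = set(families)
--     known = [family for family in SEMANTIC_COLLECTOR_FAMILIES if family in seen]
--     unknown = sorted(token for token in seen if token not in SEMANTIC_COLLECTOR_FAMILIES)
--     canonical = known + unknown
--     if not canonical:
--         return "auto"
--     return ",".join(canonical)
-- ===== SOURCE B (Python) =====
-- SEMANTIC_COLLECTOR_FAMILIES = (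
--     "definitions",
--     "executions",
--     "direct_call_targets",
--     "method_call_targets",
--     "bridge_path_choices",
--     "callable_summaries",
--     "type_metadata",
--     "struct_field_metadata",
--     "binding_facts",
--     "return_facts",
--     "local_auto_facts",
--     "query_facts",
--     "try_facts",
--     "on_error_facts",
-- )
--
-- INDEX = {name: i for i, name in enumerate(SEMANTIC_COLLECTOR_FAMILIES)}
--
--
-- def benchmark_row_fact_families_mode(row: dict) -> str:
--     value = row.get("fact_families", "auto")
--     if value is None:
--         return "auto"
--     normalized = str(value).strip().lower()
--     if normalized in ("", "all", "auto", "null"):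
--         return "auto"
--     if normalized == "none":
--         return "none"
--     tokens = [t.strip() for t in normalized.split(",") if t.strip()]
--     if not tokens:
--         return "auto"
--     canonical = sorted(set(tokens), key=lambda t: (INDEX.get(t, len(INDEX)), t))
--     return ",".join(canonical)
-- ===== Notes on version B (the rewrite author's own statement) =====
-- stated objective: idiomatic
-- what changed: A builds the canonical list in two phases (scan the constant family tuple for known tokens, separately sort the unknown ones, concatenate); B precomputes a name-to-index dict and produces the whole list with one sort of the token set under the composite key (index-or-14, token).
import Mathlib
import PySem

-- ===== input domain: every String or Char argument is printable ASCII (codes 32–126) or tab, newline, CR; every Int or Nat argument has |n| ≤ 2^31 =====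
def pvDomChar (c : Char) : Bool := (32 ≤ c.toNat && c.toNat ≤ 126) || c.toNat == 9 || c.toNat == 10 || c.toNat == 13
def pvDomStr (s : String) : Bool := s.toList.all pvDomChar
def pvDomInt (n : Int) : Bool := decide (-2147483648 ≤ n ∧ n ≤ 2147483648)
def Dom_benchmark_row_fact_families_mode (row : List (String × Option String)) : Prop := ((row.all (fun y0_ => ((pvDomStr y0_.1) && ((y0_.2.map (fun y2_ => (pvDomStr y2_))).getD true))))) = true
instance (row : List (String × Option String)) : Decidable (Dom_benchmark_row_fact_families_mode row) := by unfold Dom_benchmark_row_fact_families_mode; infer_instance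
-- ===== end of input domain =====

-- B replaces A's two-phase canonicalisation (scan of the constant family tuple for knowns + a
-- separate sort of unknowns + concatenation) by ONE sort of the token set under the composite key
-- (family-table index or 14, token); objective: idiomatic, no speed claim.

-- ===== PORT A =====
def pvFamilies : List String :=
  ["definitions", "executions", "direct_call_targets", "method_call_targets",
   "bridge_path_choices", "callable_summaries", "type_metadata", "struct_field_metadata",
   "binding_facts", "return_facts", "local_auto_facts", "query_facts", "try_facts",
   "on_error_facts"]

def benchmark_row_fact_families_mode (row : List (String × Option String)) : String :=
  let value := ((PySem.Dict.mk row).get? "fact_families").getD (some "auto")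
  match value with
  | none => "auto"
  | some s =>
    let normalized := PySem.Str.lower (PySem.Str.strip s)
    if normalized = "" ∨ normalized = "all" ∨ normalized = "auto" ∨ normalized = "null" then "auto"
    else if normalized = "none" then "none"
    else
      -- sep "," ≠ "" so split? is exact here
      let families := (((PySem.Str.split? normalized ",").getD []).map PySem.Str.strip).filter (fun t => t ≠ "")
      if families = [] then "auto"
      else
        let seen : PySem.Set String := PySem.Set.ofList families
        let known := pvFamilies.filter (fun f => PySem.Set.contains seen f)
        let unknown := PySem.List.sorted (seen.filter (fun t => ¬ t ∈ pvFamilies)) (fun t => t)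
        let canonical := known ++ unknown
        if canonical = [] then "auto" else PySem.Str.join "," canonical

-- ===== PORT B =====
-- INDEX = {name: i for i, name in enumerate(SEMANTIC_COLLECTOR_FAMILIES)}
def pvIndex : PySem.Dict String Int :=
  PySem.Dict.ofList ((PySem.List.enumerate pvFamilies).map (fun p => (p.2, p.1)))

def benchmark_row_fact_families_mode_alt (row : List (String × Option String)) : String :=
  let value := ((PySem.Dict.mk row).get? "fact_families").getD (some "auto")
  match value with
  | none => "auto"
  | some s =>
    let normalized := PySem.Str.lower (PySem.Str.strip s)
    if normalized = "" ∨ normalized = "all" ∨ normalized = "auto" ∨ normalized = "null" then "auto"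
    else if normalized = "none" then "none"
    else
      -- sep "," ≠ "" so split? is exact here
      let tokens := (((PySem.Str.split? normalized ",").getD []).map PySem.Str.strip).filter (fun t => t ≠ "")
      if tokens = [] then "auto"
      else
        PySem.Str.join ","
          (PySem.List.sorted2 (PySem.Set.ofList tokens)
            (fun t => PySem.Dict.getD pvIndex t 14) (fun t => t))

-- ===== PRECONDITION & SPEC =====
def Spec_benchmark_row_fact_families_mode (row : List (String × Option String)) (out : String) : Prop := out = benchmark_row_fact_families_mode_alt row
instance (row : List (String × Option String)) (out : String) : Decidable (Spec_benchmark_row_fact_families_mode row out) := by unfold Spec_benchmark_row_fact_families_mode; infer_instance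

-- ===== CLAIM (what is proved, stated in full; the proofs are below) =====
def Claim_equal_benchmark_row_fact_families_mode : Prop := ∀ (row : List (String × Option String)), Dom_benchmark_row_fact_families_mode row → Spec_benchmark_row_fact_families_mode row (benchmark_row_fact_families_mode row)

-- ===== LEMMAS AND PROOFS =====

-- B's tuple-key sort is the single-key sort under the lexicographic order on Int × String.
theorem pv_sorted2_eq_sorted_lex (xs : List String) (k1 : String → Int) :
    PySem.List.sorted2 xs k1 (fun t => t)
      = PySem.List.sorted xs (fun t => toLex (k1 t, t)) := by
  unfold PySem.List.sorted2 PySem.List.sorted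
  simp only []
  congr 1
  funext acc x
  congr 1
  funext a b
  by_cases h1 : k1 a < k1 b
  · simp [h1, Prod.Lex.toLex_lt_toLex]
  · by_cases h2 : k1 b < k1 a
    · have hne : ¬ (k1 a = k1 b) := by omega
      simp [h1, h2, Prod.Lex.toLex_lt_toLex, hne]
    · have : k1 a = k1 b := by omega
      simp [Prod.Lex.toLex_lt_toLex, this]

theorem pv_fam_nodup : pvFamilies.Nodup := by decide

theorem pv_fam_pairwise :
    pvFamilies.Pairwise (fun a b => PySem.Dict.getD pvIndex a 14 < PySem.Dict.getD pvIndex b 14) := by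
  decide

theorem pv_fam_lt : ∀ f ∈ pvFamilies, PySem.Dict.getD pvIndex f 14 < 14 := by decide

theorem pv_keys_index : pvIndex.keys = pvFamilies := by decide

theorem pv_k1_of_not_mem {t : String} (h : t ∉ pvFamilies) :
    PySem.Dict.getD pvIndex t 14 = 14 := by
  have hnone : pvIndex.get? t = none :=
    (PySem.Dict.get?_eq_none_iff_not_mem_keys pvIndex t).mpr (pv_keys_index ▸ h)
  show (pvIndex.get? t).getD 14 = 14
  rw [hnone]; rfl

-- The core: A's known ++ unknown (with its dead emptiness guard) equals B's single composite sort.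
theorem pv_core (tokens : List String) (h : tokens ≠ []) :
    (let seen : PySem.Set String := PySem.Set.ofList tokens
     let known := pvFamilies.filter (fun f => PySem.Set.contains seen f)
     let unknown := PySem.List.sorted (seen.filter (fun t => ¬ t ∈ pvFamilies)) (fun t => t)
     let canonical := known ++ unknown
     if canonical = [] then "auto" else PySem.Str.join "," canonical)
    = PySem.Str.join ","
        (PySem.List.sorted2 (PySem.Set.ofList tokens)
          (fun t => PySem.Dict.getD pvIndex t 14) (fun t => t)) := by
  simp only []
  set k1 : String → Int := fun t => PySem.Dict.getD pvIndex t 14 with hk1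
  set seen : PySem.Set String := PySem.Set.ofList tokens with hseen
  set known := pvFamilies.filter (fun f => PySem.Set.contains seen f) with hknown
  set unknownBase := seen.filter (fun t => decide (¬ t ∈ pvFamilies)) with hub
  set unknown := PySem.List.sorted unknownBase (fun t => t) with hunk
  have hseen_nodup : seen.Nodup := PySem.Set.nodup_ofList tokens
  have hmem_seen : ∀ x, x ∈ seen ↔ x ∈ tokens := fun x => PySem.Set.mem_ofList tokens x
  have hcontains : ∀ x, PySem.Set.contains seen x = true ↔ x ∈ seen := by
    intro x
    show List.contains seen x = true ↔ x ∈ seen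
    exact List.contains_iff_mem
  have hmem_known : ∀ x, x ∈ known ↔ x ∈ pvFamilies ∧ x ∈ seen := by
    intro x
    rw [hknown, List.mem_filter, hcontains]
  have hmem_ub : ∀ x, x ∈ unknownBase ↔ x ∈ seen ∧ x ∉ pvFamilies := by
    intro x
    rw [hub, List.mem_filter]
    simp
  have hmem_unknown : ∀ x, x ∈ unknown ↔ x ∈ seen ∧ x ∉ pvFamilies := by
    intro x
    rw [hunk, PySem.List.mem_sorted, hmem_ub]
  -- canonical is nonempty
  obtain ⟨t0, rest, rfl⟩ : ∃ a l, tokens = a :: l := by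
    cases tokens with
    | nil => exact absurd rfl h
    | cons a l => exact ⟨a, l, rfl⟩
  have ht0 : t0 ∈ seen := (hmem_seen t0).mpr (List.mem_cons_self ..)
  have hcanon_ne : known ++ unknown ≠ [] := by
    intro hc
    by_cases hf : t0 ∈ pvFamilies
    · have : t0 ∈ known ++ unknown := List.mem_append_left _ ((hmem_known t0).mpr ⟨hf, ht0⟩)
      rw [hc] at this; exact absurd this (List.not_mem_nil)
    · have : t0 ∈ known ++ unknown := List.mem_append_right _ ((hmem_unknown t0).mpr ⟨ht0, hf⟩)
      rw [hc] at this; exact absurd this (List.not_mem_nil)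
  rw [if_neg hcanon_ne]
  congr 1
  rw [pv_sorted2_eq_sorted_lex]
  symm
  apply PySem.List.sorted_eq_of_perm_of_pairwise_lt
  · -- permutation
    have hknown_nodup : known.Nodup := pv_fam_nodup.filter _
    have hub_nodup : unknownBase.Nodup := hseen_nodup.filter _
    have hunk_nodup : unknown.Nodup :=
      ((PySem.List.sorted_perm unknownBase (fun t => t) false).nodup_iff).mpr hub_nodup
    have hdisj : known.Disjoint unknown := by
      intro x hxk hxu
      exact ((hmem_unknown x).mp hxu).2 ((hmem_known x).mp hxk).1
    refine (List.perm_ext_iff_of_nodup (hknown_nodup.append hunk_nodup hdisj) hseen_nodup).mpr ?_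
    intro x
    constructor
    · intro hx
      rcases List.mem_append.mp hx with hx | hx
      · exact ((hmem_known x).mp hx).2
      · exact ((hmem_unknown x).mp hx).1
    · intro hx
      by_cases hf : x ∈ pvFamilies
      · exact List.mem_append_left _ ((hmem_known x).mpr ⟨hf, hx⟩)
      · exact List.mem_append_right _ ((hmem_unknown x).mpr ⟨hx, hf⟩)
  · -- pairwise strict increase of the lex key
    rw [List.pairwise_append]
    refine ⟨?_, ?_, ?_⟩
    · refine (pv_fam_pairwise.filter _).imp ?_
      intro a b hab
      exact Prod.Lex.toLex_lt_toLex.mpr (Or.inl hab)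
    · have hle : unknown.Pairwise (fun a b => a ≤ b) := by
        have := PySem.List.sorted_pairwise unknownBase (fun t => t)
        simpa using this
      have hne : unknown.Pairwise (fun a b => a ≠ b) := by
        have : unknown.Nodup :=
          ((PySem.List.sorted_perm unknownBase (fun t => t) false).nodup_iff).mpr
            (hseen_nodup.filter _)
        exact this
      refine (hle.and hne).imp_of_mem ?_
      intro a b ha hb hab
      have hka : k1 a = 14 := pv_k1_of_not_mem ((hmem_unknown a).mp ha).2
      have hkb : k1 b = 14 := pv_k1_of_not_mem ((hmem_unknown b).mp hb).2
      refine Prod.Lex.toLex_lt_toLex.mpr (Or.inr ⟨by rw [hka, hkb], ?_⟩)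
      exact lt_of_le_of_ne hab.1 hab.2
    · intro a ha b hb
      have hka : k1 a < 14 := pv_fam_lt a ((hmem_known a).mp ha).1
      have hkb : k1 b = 14 := pv_k1_of_not_mem ((hmem_unknown b).mp hb).2
      exact Prod.Lex.toLex_lt_toLex.mpr (Or.inl (by omega))

-- ===== VERDICT (by name: the statement is the Claim_ definition above) =====
theorem benchmark_row_fact_families_mode_spec : Claim_equal_benchmark_row_fact_families_mode := by
  intro row _
  unfold Spec_benchmark_row_fact_families_mode benchmark_row_fact_families_mode benchmark_row_fact_families_mode_alt
  cases hv : ((PySem.Dict.mk row).get? "fact_families").getD (some "auto") with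
  | none => rfl
  | some s =>
    simp only []
    by_cases h1 : PySem.Str.lower (PySem.Str.strip s) = "" ∨ PySem.Str.lower (PySem.Str.strip s) = "all" ∨ PySem.Str.lower (PySem.Str.strip s) = "auto" ∨ PySem.Str.lower (PySem.Str.strip s) = "null"
    · simp only [if_pos h1]
    · simp only [if_neg h1]
      by_cases h2 : PySem.Str.lower (PySem.Str.strip s) = "none"
      · simp only [if_pos h2]
      · simp only [if_neg h2]
        by_cases h3 : (((PySem.Str.split? (PySem.Str.lower (PySem.Str.strip s)) ",").getD []).map PySem.Str.strip).filter (fun t => t ≠ "") = []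
        · simp only [if_pos h3]
        · simp only [if_neg h3]
          exact pv_core _ h3
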